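-- pv_equiv track=rewrite | github.com/k-acdm/mykt-eitango | scripts/generate_kiso_questions/rank_19_decimal_addsub.py | _resolve_band_d_subkind
-- ===== SOURCE A (Python) =====
-- from typing import Any, Dict, List, Optional, Tuple
--
-- def _resolve_band_d_subkind(slot_index: int, subcounts: Dict[str, int]) -> Tuple[str, int]:
--     """slot_index → (subkind, sub_slot_index)。
--
--     sub_slot_index は subkind 内での 0-based 位置（force_int_ans 判定に使用）。
--     """
--     cumulative = 0
--     for subkind in ("all_add", "add_sub_mix"):
--         c = subcounts.get(subkind, 0)
--         if c == 0:
--             continue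
--         if slot_index < cumulative + c:
--             return subkind, slot_index - cumulative
--         cumulative += c
--     return "add_sub_mix", slot_index - cumulative
-- ===== SOURCE B (Python) =====
-- from typing import Dict, Tuple
--
-- _BAND_ORDER = ("all_add", "add_sub_mix")
--
-- def _resolve(slot: int, bands) -> Tuple[str, int]:
--     """Consume bands recursively: slot is the index relative to the current band's start."""
--     if not bands:
--         return "add_sub_mix", slot
--     name, c = bands[0]
--     if c and slot < c:
--         return name, slot
--     return _resolve(slot - c, bands[1:])
--
-- def _resolve_band_d_subkind(slot_index: int, subcounts: Dict[str, int]) -> Tuple[str, int]: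
--     return _resolve(slot_index, [(k, subcounts.get(k, 0)) for k in _BAND_ORDER])
-- ===== Notes on version B (the rewrite author's own statement) =====
-- stated objective: alternative
-- what changed: Replaced the iterative loop over hardcoded subkind names carrying a cumulative start-offset accumulator by a recursive consumer of a precomputed (name, count) band list that carries the remaining band-relative index and falls through via the empty-list base case.
import Mathlib
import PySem

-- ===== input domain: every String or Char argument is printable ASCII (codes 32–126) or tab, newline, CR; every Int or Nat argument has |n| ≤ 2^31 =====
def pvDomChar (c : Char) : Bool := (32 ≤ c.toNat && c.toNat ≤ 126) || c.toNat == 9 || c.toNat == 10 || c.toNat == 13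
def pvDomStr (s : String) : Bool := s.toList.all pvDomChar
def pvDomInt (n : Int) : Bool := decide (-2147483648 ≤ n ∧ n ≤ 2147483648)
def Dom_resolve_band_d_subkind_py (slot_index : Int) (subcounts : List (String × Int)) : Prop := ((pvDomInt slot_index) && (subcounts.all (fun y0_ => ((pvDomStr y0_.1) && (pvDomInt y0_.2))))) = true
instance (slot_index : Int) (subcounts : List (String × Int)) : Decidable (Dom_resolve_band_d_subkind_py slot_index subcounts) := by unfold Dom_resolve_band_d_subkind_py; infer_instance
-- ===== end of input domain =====

-- B replaces A's iterative cumulative-offset loop by a recursive consumer over a band list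
-- that carries the remaining relative index (objective: alternative decomposition).

-- ===== PORT A =====
-- literal port: fold over the tuple ("all_add", "add_sub_mix") carrying (cumulative, early-return)
def resolve_band_d_subkind_py (slot_index : Int) (subcounts : List (String × Int)) : String × Int :=
  let step : Int × Option (String × Int) → String → Int × Option (String × Int) :=
    fun st subkind =>
      match st with
      | (cum, some r) => (cum, some r)          -- already returned inside the loop
      | (cum, none) =>
        let c := (PySem.Dict.mk subcounts).getD subkind 0
        if c = 0 then (cum, none)               -- continue
        else if slot_index < cum + c then (cum, some (subkind, slot_index - cum))
        else (cum + c, none)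
  match ["all_add", "add_sub_mix"].foldl step (0, none) with
  | (_, some r) => r
  | (cum, none) => ("add_sub_mix", slot_index - cum)

-- ===== PORT B =====
-- recursion on the band list: slot is the index relative to the current band's start
def pvResolveBands (slot : Int) (bands : List (String × Int)) : String × Int :=
  match bands with
  | [] => ("add_sub_mix", slot)
  | (name, c) :: rest =>
    if c ≠ 0 ∧ slot < c then (name, slot)
    else pvResolveBands (slot - c) rest

def resolve_band_d_subkind_py_alt (slot_index : Int) (subcounts : List (String × Int)) : String × Int :=
  pvResolveBands slot_index
    (["all_add", "add_sub_mix"].map (fun k => (k, (PySem.Dict.mk subcounts).getD k 0)))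

-- ===== PRECONDITION & SPEC =====
def Spec_resolve_band_d_subkind_py (slot_index : Int) (subcounts : List (String × Int)) (out : String × Int) : Prop := out = resolve_band_d_subkind_py_alt slot_index subcounts
instance (slot_index : Int) (subcounts : List (String × Int)) (out : String × Int) : Decidable (Spec_resolve_band_d_subkind_py slot_index subcounts out) := by unfold Spec_resolve_band_d_subkind_py; infer_instance

-- ===== CLAIM (what is proved, stated in full; the proofs are below) =====
def Claim_equal_resolve_band_d_subkind_py : Prop := ∀ (slot_index : Int) (subcounts : List (String × Int)), Dom_resolve_band_d_subkind_py slot_index subcounts → Spec_resolve_band_d_subkind_py slot_index subcounts (resolve_band_d_subkind_py slot_index subcounts)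

-- ===== LEMMAS AND PROOFS =====

-- ===== VERDICT (by name: the statement is the Claim_ definition above) =====
theorem resolve_band_d_subkind_py_spec : Claim_equal_resolve_band_d_subkind_py := by
  intro slot_index subcounts _
  unfold Spec_resolve_band_d_subkind_py resolve_band_d_subkind_py resolve_band_d_subkind_py_alt
  simp only [List.foldl, List.map, pvResolveBands]
  generalize (PySem.Dict.mk subcounts).getD "all_add" 0 = a
  generalize (PySem.Dict.mk subcounts).getD "add_sub_mix" 0 = m
  by_cases ha : a = 0 <;> by_cases hm : m = 0 <;>
    simp [ha, hm] <;> split_ifs <;> simp_all <;> split_ifs <;> simp_all <;> omega
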